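-- pv_equiv track=rewrite | github.com/pypi-data/pypi-mirror-313 | packages/maquinas/maquinas-0.3.2.0.tar.gz/maquinas-0.3.2.0/maquinas/languages.py | string_left_cancellation
-- ===== SOURCE A (Python) =====
-- def string_left_cancellation(w, b):
--     if len(w) == 0:
--         return ""
--     else:
--         a = w[0]
--         w_ = w[1:]
--         if a == b:
--             return w_
--         else:
--             return string_left_cancellation(w_, b)
-- ===== SOURCE B (Python) =====
-- def string_left_cancellation(w, b):
--     # A compares b against single characters, so a match is only possible
--     # when b is exactly one character; then the answer is the slice after
--     # the first occurrence found by str.find.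
--     if len(b) != 1:
--         return ""
--     i = w.find(b)
--     return "" if i == -1 else w[i+1:]
-- ===== Notes on version B (the rewrite author's own statement) =====
-- stated objective: faster
-- what changed: A recurses character by character comparing each against b; B observes that a per-character comparison can only succeed when b is a single character, so it guards on len(b)==1 and then uses one str.find plus one slice.
import Mathlib
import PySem

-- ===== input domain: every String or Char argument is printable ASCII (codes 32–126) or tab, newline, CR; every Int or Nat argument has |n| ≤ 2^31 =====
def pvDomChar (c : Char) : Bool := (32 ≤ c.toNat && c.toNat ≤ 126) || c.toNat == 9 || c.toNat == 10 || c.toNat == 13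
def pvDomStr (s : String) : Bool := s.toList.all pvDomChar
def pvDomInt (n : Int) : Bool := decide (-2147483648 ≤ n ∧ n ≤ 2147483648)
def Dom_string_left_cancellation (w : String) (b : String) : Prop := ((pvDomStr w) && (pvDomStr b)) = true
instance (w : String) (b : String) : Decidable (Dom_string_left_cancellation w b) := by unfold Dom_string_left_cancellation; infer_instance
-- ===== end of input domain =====

-- B: instead of A's per-character recursion, guard on len(b)==1 (A's char-vs-b test can
-- only succeed then) and use str.find plus one slice; return value only.
-- ===== PORT A =====
def slcA (cs : List Char) (b : String) : String :=
  match cs with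
  | [] => ""
  | a :: w_ => if String.ofList [a] == b then String.ofList w_ else slcA w_ b

def string_left_cancellation (w : String) (b : String) : String :=
  slcA w.toList b

-- ===== PORT B =====
def string_left_cancellation_alt (w : String) (b : String) : String :=
  if PySem.Str.len b ≠ 1 then ""
  else
    let i := PySem.Str.find w b
    if i = -1 then "" else PySem.Str.slice w (some (i + 1)) none

-- ===== PRECONDITION & SPEC =====
def Spec_string_left_cancellation (w : String) (b : String) (out : String) : Prop := out = string_left_cancellation_alt w b
instance (w : String) (b : String) (out : String) : Decidable (Spec_string_left_cancellation w b out) := by unfold Spec_string_left_cancellation; infer_instance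

-- ===== CLAIM (what is proved, stated in full; the proofs are below) =====
def Claim_equal_string_left_cancellation : Prop := ∀ (w : String) (b : String), Dom_string_left_cancellation w b → Spec_string_left_cancellation w b (string_left_cancellation w b)

-- ===== LEMMAS AND PROOFS =====
theorem mk_single_eq_iff (a : Char) (b : String) : (String.ofList [a] = b) ↔ ([a] = b.toList) := by
  constructor
  · intro h; rw [← h, String.toList_ofList]
  · intro h; rw [h, String.ofList_toList]

theorem slcA_of_len_ne_one (cs : List Char) (b : String) (hb : b.toList.length ≠ 1) :
    slcA cs b = "" := by
  induction cs with
  | nil => rfl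
  | cons a t ih =>
    simp only [slcA]
    rw [if_neg, ih]
    intro h
    have := (mk_single_eq_iff a b).mp (by exact_mod_cast eq_of_beq h)
    apply hb; rw [← this]; rfl

theorem singleton_infix_iff_mem (c : Char) (l : List Char) : [c] <:+: l ↔ c ∈ l := by
  constructor
  · intro h; exact h.sublist.subset (by simp)
  · intro h
    obtain ⟨s, t, rfl⟩ := List.append_of_mem h
    exact ⟨s, t, by simp⟩

theorem find_cons_single (a c : Char) (t : List Char) :
    PySem.Chars.find (a :: t) [c] =
      if a = c then 0
      else if PySem.Chars.find t [c] = -1 then -1 else PySem.Chars.find t [c] + 1 := by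
  by_cases hac : a = c
  · subst hac
    rw [if_pos rfl]
    have hinf : ([a] : List Char) <:+: (a :: t) := (singleton_infix_iff_mem a _).mpr (by simp)
    have h0 : 0 ≤ PySem.Chars.find (a :: t) [a] := (PySem.Chars.find_nonneg_iff _ _).mpr hinf
    obtain ⟨hpre, hmin⟩ := PySem.Chars.find_spec h0
    by_contra hne
    have hpos : 0 < (PySem.Chars.find (a :: t) [a]).toNat := by omega
    exact hmin 0 hpos (by simp)
  · rw [if_neg hac]
    by_cases hft : PySem.Chars.find t [c] = -1
    · rw [if_pos hft, PySem.Chars.find_eq_neg_one_iff]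
      rw [PySem.Chars.find_eq_neg_one_iff, singleton_infix_iff_mem] at hft
      rw [singleton_infix_iff_mem]
      simp [hft, Ne.symm hac]
    · rw [if_neg hft]
      have h0t : 0 ≤ PySem.Chars.find t [c] := by
        have := PySem.Chars.neg_one_le_find t [c]; omega
      obtain ⟨hpret, hmint⟩ := PySem.Chars.find_spec h0t
      have hinf : ([c] : List Char) <:+: (a :: t) := by
        rw [singleton_infix_iff_mem]
        have : c ∈ t.drop (PySem.Chars.find t [c]).toNat := hpret.subset (by simp)
        exact List.mem_cons_of_mem a (List.mem_of_mem_drop this)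
      have h0 : 0 ≤ PySem.Chars.find (a :: t) [c] := (PySem.Chars.find_nonneg_iff _ _).mpr hinf
      obtain ⟨hpre, hmin⟩ := PySem.Chars.find_spec h0
      have hne0 : (PySem.Chars.find (a :: t) [c]).toNat ≠ 0 := by
        intro h
        rw [h] at hpre
        simp only [List.drop_zero] at hpre
        exact hac ((List.cons_prefix_cons.mp hpre).1.symm)
      obtain ⟨m, hm⟩ : ∃ m, (PySem.Chars.find (a :: t) [c]).toNat = m + 1 :=
        ⟨(PySem.Chars.find (a :: t) [c]).toNat - 1, by omega⟩
      have hprem : ([c] : List Char) <+: t.drop m := by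
        have := hpre; rw [hm] at this; simpa using this
      have hminm : ∀ i, i < m → ¬ ([c] : List Char) <+: t.drop i := by
        intro i hi hp
        exact hmin (i + 1) (by omega) (by simpa using hp)
      have hmeq : m = (PySem.Chars.find t [c]).toNat := by
        rcases lt_trichotomy m (PySem.Chars.find t [c]).toNat with h | h | h
        · exact absurd hprem (hmint m h)
        · exact h
        · exact absurd hpret (hminm _ h)
      omega

theorem slcA_single (c : Char) (cs : List Char) (b : String) (hb : b.toList = [c]) :
    slcA cs b =
      (if PySem.Chars.find cs [c] = -1 then ""
       else String.ofList (cs.drop (PySem.Chars.find cs [c] + 1).toNat)) := by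
  induction cs with
  | nil =>
    have : PySem.Chars.find ([] : List Char) [c] = -1 := by
      rw [PySem.Chars.find_eq_neg_one_iff]; simp
    simp [slcA, this]
  | cons a t ih =>
    simp only [slcA]
    rw [find_cons_single]
    by_cases hac : a = c
    · subst hac
      rw [if_pos, if_pos rfl]
      · simp
      · rw [beq_iff_eq, mk_single_eq_iff, hb]
    · rw [if_neg hac, if_neg (by rw [beq_iff_eq, mk_single_eq_iff, hb]; simpa using hac), ih]
      by_cases hf : PySem.Chars.find t [c] = -1
      · simp [hf]
      · have h0 : 0 ≤ PySem.Chars.find t [c] := by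
          have := PySem.Chars.neg_one_le_find t [c]; omega
        rw [if_neg hf, if_neg (by omega), if_neg (by omega)]
        congr 1
        have : (PySem.Chars.find t [c] + 1 + 1).toNat = (PySem.Chars.find t [c] + 1).toNat + 1 := by omega
        rw [this, List.drop_succ_cons]

-- ===== VERDICT (by name: the statement is the Claim_ definition above) =====
theorem string_left_cancellation_spec : Claim_equal_string_left_cancellation := by
  intro w b _
  unfold Spec_string_left_cancellation string_left_cancellation string_left_cancellation_alt
  by_cases hb : PySem.Str.len b = 1
  · obtain ⟨c, hc⟩ : ∃ c, b.toList = [c] := by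
      have : b.toList.length = 1 := by simpa [PySem.Str.len, PySem.Chars.len] using hb
      exact List.length_eq_one_iff.mp this
    rw [if_neg (by simpa using hb)]
    rw [slcA_single c w.toList b hc]
    have hfind : PySem.Str.find w b = PySem.Chars.find w.toList [c] := by
      simp [PySem.Str.find_eq, hc]
    by_cases hf : PySem.Chars.find w.toList [c] = -1
    · simp only [hfind]
      simp [hf]
    · have h0 : 0 ≤ PySem.Chars.find w.toList [c] := by
        have := PySem.Chars.neg_one_le_find w.toList [c]; omega
      rw [if_neg hf]
      simp only [hfind]
      rw [if_neg hf]
      have : (PySem.Str.slice w (some (PySem.Chars.find w.toList [c] + 1)) none).toList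
          = w.toList.drop (PySem.Chars.find w.toList [c] + 1).toNat := by
        rw [PySem.Str.toList_slice, PySem.Chars.slice_eq_listSlice, PySem.List.slice_from w.toList (by omega : (0:Int) ≤ PySem.Chars.find w.toList [c] + 1)]
      calc String.ofList (w.toList.drop (PySem.Chars.find w.toList [c] + 1).toNat)
          = String.ofList (PySem.Str.slice w (some (PySem.Chars.find w.toList [c] + 1)) none).toList := by rw [this]
        _ = _ := String.ofList_toList
  · rw [if_pos (by simpa using hb), slcA_of_len_ne_one]
    intro h; apply hb; simp [PySem.Str.len, h]
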